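-- pv_equiv track=rewrite | github.com/pypi-data/pypi-mirror-352 | packages/SymSolver/symsolver-2025.6.0.tar.gz/symsolver-2025.6.0/SymSolver/tools/iterables.py | pop_index_tracker
-- ===== SOURCE A (Python) =====
-- def pop_index_tracker(idx, popping):
--     '''returns a new list of indices when popping are popped from the list that idx corresponds to.
--
--     - decrements all indices larger than 7 by 1 if 7 is being popped.
--     - removes indices which are being popped, if applicable.
--     E.g., (idx=[1,4,8,15], popping=[4,5,9]) --> (1,6,12), because:
--         - the 1 is unchanged.
--         - the 4 is popped, entirely.
--         - the 8 is not popped, however 2 indices are popped below it, so it becomes a 6.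
--         - the 15 is not popped, however 3 are popped below, so it becomes a 12.
--     '''
--     result = []
--     for i in idx:
--         if i in popping:
--             continue
--         else:
--             i = i - sum(i > pop for pop in popping)
--             result.append(i)
--     return result
-- ===== SOURCE B (Python) =====
-- def _bisect_left(a, x):
--     # leftmost insertion point of x in sorted list a (hand-written: may not import bisect)
--     lo, hi = 0, len(a)
--     while lo < hi:
--         mid = (lo + hi) // 2
--         if a[mid] < x:
--             lo = mid + 1
--         else:
--             hi = mid
--     return lo
--
--
-- def pop_index_tracker(idx, popping):
--     popset = set(popping)
--     sp = sorted(popping)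
--     return [i - _bisect_left(sp, i) for i in idx if i not in popset]
-- ===== Notes on version B (the rewrite author's own statement) =====
-- stated objective: faster
-- what changed: Replaces the per-index linear membership test and linear counting scan over popping by a set for membership plus one sort of popping with a hand-written binary search counting the smaller popped indices.
import Mathlib
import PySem

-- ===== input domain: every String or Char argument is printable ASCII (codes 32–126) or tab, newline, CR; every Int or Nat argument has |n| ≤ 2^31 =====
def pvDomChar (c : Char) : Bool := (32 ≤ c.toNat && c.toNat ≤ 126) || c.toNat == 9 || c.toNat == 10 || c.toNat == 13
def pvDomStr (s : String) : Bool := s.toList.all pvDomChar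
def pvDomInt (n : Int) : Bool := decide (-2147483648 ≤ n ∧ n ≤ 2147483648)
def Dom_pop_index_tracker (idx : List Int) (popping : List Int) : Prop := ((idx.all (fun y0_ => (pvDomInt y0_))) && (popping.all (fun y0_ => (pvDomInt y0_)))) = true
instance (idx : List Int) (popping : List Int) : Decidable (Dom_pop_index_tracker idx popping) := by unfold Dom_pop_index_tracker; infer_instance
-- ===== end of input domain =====

-- B replaces A's per-index linear membership test and linear counting scan with a set
-- for membership plus one sort of popping and a binary search counting the smaller
-- popped indices (objective: faster, asymptotic).

-- ===== PORT A =====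
-- literal transliteration of A: for each i, skip it if it is in popping, otherwise
-- append i minus sum(i > pop for pop in popping).
def pop_index_tracker (idx : List Int) (popping : List Int) : List Int :=
  idx.foldl (fun result i =>
    if popping.contains i then result
    else result ++ [i - (popping.map (fun pop => if pop < i then (1 : Int) else 0)).sum]) []

-- ===== PORT B =====
-- hand-written _bisect_left from Source B: lo/hi loop ported as recursion on hi - lo.
-- a[mid] is ported as getD a mid 0, exact here because lo ≤ mid < hi ≤ a.length at every call.
def pvBisectLeft (a : List Int) (x : Int) (lo hi : Nat) : Nat :=
  if _h : lo < hi then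
    let mid := (lo + hi) / 2
    if a.getD mid 0 < x then pvBisectLeft a x (mid + 1) hi
    else pvBisectLeft a x lo mid
  else lo
termination_by hi - lo
decreasing_by all_goals omega

def pop_index_tracker_alt (idx : List Int) (popping : List Int) : List Int :=
  let popset : PySem.Set Int := PySem.Set.ofList popping
  let sp := PySem.List.sorted popping (fun x => x)
  (idx.filter (fun i => !(popset.contains i))).map (fun i => i - pvBisectLeft sp i 0 sp.length)

-- ===== PRECONDITION & SPEC =====
def Spec_pop_index_tracker (idx : List Int) (popping : List Int) (out : List Int) : Prop := out = pop_index_tracker_alt idx popping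
instance (idx : List Int) (popping : List Int) (out : List Int) : Decidable (Spec_pop_index_tracker idx popping out) := by unfold Spec_pop_index_tracker; infer_instance

-- ===== CLAIM (what is proved, stated in full; the proofs are below) =====
def Claim_equal_pop_index_tracker : Prop := ∀ (idx : List Int) (popping : List Int), Dom_pop_index_tracker idx popping → Spec_pop_index_tracker idx popping (pop_index_tracker idx popping)

-- ===== LEMMAS AND PROOFS =====

-- In a ≤-sorted list, the elements < x are exactly the first countP (· < x) ones.
theorem pv_sorted_lt_char (x : Int) (sp : List Int)
    (hs : sp.Pairwise (fun a b => a ≤ b)) (m : Nat) (hm : m < sp.length) :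
    (sp[m] < x ↔ m < sp.countP (fun p => decide (p < x))) := by
  induction sp generalizing m with
  | nil => simp at hm
  | cons a t ih =>
    rcases List.pairwise_cons.mp hs with ⟨ha, ht⟩
    rcases m with _ | j
    · simp only [List.getElem_cons_zero, List.countP_cons]
      constructor
      · intro h
        have : (if (decide (a < x)) = true then 1 else 0) = 1 := by simp [h]
        omega
      · intro h
        by_contra hax
        have h0 : t.countP (fun p => decide (p < x)) = 0 := by
          rw [List.countP_eq_zero]
          intro b hb
          have := ha b hb
          simp only [decide_eq_true_eq]
          omega
        simp [hax, h0] at h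
    · simp only [List.getElem_cons_succ, List.countP_cons]
      have hj : j < t.length := by simpa using hm
      have := ih ht j hj
      by_cases hax : a < x
      · have h1 : (if (decide (a < x)) = true then (1:Nat) else 0) = 1 := by simp [hax]
        rw [h1, this]
        omega
      · have h0 : t.countP (fun p => decide (p < x)) = 0 := by
          rw [List.countP_eq_zero]
          intro b hb
          have := ha b hb
          simp only [decide_eq_true_eq]
          omega
        have htj : ¬ t[j] < x := by
          have := ha t[j] (List.getElem_mem hj)
          omega
        simp [hax, h0, htj]

-- The hand-written binary search on a sorted list computes countP (· < x).
theorem pvBisectLeft_eq_countP (x : Int) (sp : List Int)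
    (hs : sp.Pairwise (fun a b => a ≤ b)) (lo hi : Nat)
    (hhi : hi ≤ sp.length)
    (hlo : lo ≤ sp.countP (fun p => decide (p < x)))
    (hc : sp.countP (fun p => decide (p < x)) ≤ hi) :
    pvBisectLeft sp x lo hi = sp.countP (fun p => decide (p < x)) := by
  by_cases h : lo < hi
  · have hmidlt : (lo + hi) / 2 < sp.length := by omega
    have hget : sp.getD ((lo + hi) / 2) 0 = sp[(lo + hi) / 2] :=
      List.getD_eq_getElem sp 0 hmidlt
    have hchar := pv_sorted_lt_char x sp hs ((lo + hi) / 2) hmidlt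
    rw [pvBisectLeft]
    simp only [dif_pos h, hget]
    by_cases hm : sp[(lo + hi) / 2] < x
    · rw [if_pos hm]
      exact pvBisectLeft_eq_countP x sp hs ((lo + hi) / 2 + 1) hi hhi
        (by have := hchar.mp hm; omega) hc
    · rw [if_neg hm]
      exact pvBisectLeft_eq_countP x sp hs lo ((lo + hi) / 2) (by omega)
        hlo (by by_contra hcon; exact hm (hchar.mpr (by omega)))
  · rw [pvBisectLeft]
    simp only [dif_neg h]
    omega
termination_by hi - lo
decreasing_by all_goals omega

-- ===== VERDICT (by name: the statement is the Claim_ definition above) =====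
theorem pop_index_tracker_spec : Claim_equal_pop_index_tracker := by
  intro idx popping _
  unfold Spec_pop_index_tracker pop_index_tracker pop_index_tracker_alt
  have hfun : (fun (result : List Int) (i : Int) =>
      if popping.contains i = true then result
      else result ++ [i - (popping.map (fun pop => if pop < i then (1 : Int) else 0)).sum])
      = (fun (result : List Int) (i : Int) =>
          if (!popping.contains i) = true then
            result ++ [i - (popping.map (fun pop => if pop < i then (1 : Int) else 0)).sum]
          else result) := by
    funext r i
    by_cases h : popping.contains i <;> simp [h]
  rw [hfun, PySem.List.foldl_append_if
    (fun i => !popping.contains i)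
    (fun i => i - (popping.map (fun pop => if pop < i then (1 : Int) else 0)).sum) idx []]
  simp only [List.nil_append]
  show _ = List.map (fun i => i - (pvBisectLeft (PySem.List.sorted popping (fun x => x)) i 0 (PySem.List.sorted popping (fun x => x)).length : Int)) (List.filter (fun i => !(PySem.Set.ofList popping).contains i) idx)
  have hsetfilter : (idx.filter (fun i => !(PySem.Set.ofList popping).contains i))
      = idx.filter (fun i => !popping.contains i) := by
    apply List.filter_congr
    intro i _
    have : (PySem.Set.ofList popping).contains i = popping.contains i := by
      simp [PySem.Set.mem_ofList]
    rw [this]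
  rw [hsetfilter]
  apply List.map_congr_left
  intro i _
  have hsum : (popping.map (fun pop => if pop < i then (1 : Int) else 0)).sum
      = (popping.countP (fun p => decide (p < i)) : Int) := by
    have := PySem.List.sum_map_ite_one_zero (fun p : Int => decide (p < i)) popping
    simpa using this
  have hperm : (PySem.List.sorted popping (fun x => x)).Perm popping :=
    PySem.List.sorted_perm popping (fun x => x) false
  have hsorted : (PySem.List.sorted popping (fun x => x)).Pairwise (fun a b => a ≤ b) := by
    have := PySem.List.sorted_pairwise popping (fun x => x)
    simpa using this
  have hcnt : (PySem.List.sorted popping (fun x => x)).countP (fun p => decide (p < i))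
      = popping.countP (fun p => decide (p < i)) := hperm.countP_eq _
  have hbl : pvBisectLeft (PySem.List.sorted popping (fun x => x)) i 0
      (PySem.List.sorted popping (fun x => x)).length
      = (PySem.List.sorted popping (fun x => x)).countP (fun p => decide (p < i)) := by
    apply pvBisectLeft_eq_countP i _ hsorted 0 _ le_rfl (Nat.zero_le _)
      List.countP_le_length
  rw [hsum, hbl, hcnt]
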